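-- pv_equiv track=rewrite | github.com/Tristan-Waddell/openclaw-control-center | skills/memory-cache-optimizer/scripts/compact_memory.py | compact_lines
-- ===== SOURCE A (Python) =====
-- def compact_lines(lines: list[str], max_items: int) -> list[str]:
--     items: list[str] = []
--     for line in lines:
--         line = line.strip()
--         if not line:
--             continue
--         if line.startswith("- "):
--             items.append(line)
--         elif len(line) < 160:
--             items.append(f"- {line}")
--     # dedupe preserving order
--     seen = set()
--     out = []
--     for item in items:
--         if item in seen:
--             continue
--         seen.add(item)
--         out.append(item)
--         if len(out) >= max_items:
--             break
--     return out
-- ===== SOURCE B (Python) =====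
-- def compact_lines(lines: list[str], max_items: int) -> list[str]:
--     def _norm(raw):
--         line = raw.strip()
--         if not line:
--             return None
--         if line.startswith("- "):
--             return line
--         if len(line) < 160:
--             return "- " + line
--         return None
--
--     seen = set()
--     out = []
--     for raw in lines:
--         item = _norm(raw)
--         if item is None or item in seen:
--             continue
--         seen.add(item)
--         out.append(item)
--         if len(out) >= max_items:
--             break
--     return out
-- ===== Notes on version B (the rewrite author's own statement) =====
-- stated objective: alternative
-- what changed: Replaces A's two sequential passes (build normalized items list, then dedupe with a cap) by a single fused pass over the raw lines that normalizes via a helper, dedupes with a seen-set and stops scanning lines as soon as the cap is reached.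
import Mathlib
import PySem

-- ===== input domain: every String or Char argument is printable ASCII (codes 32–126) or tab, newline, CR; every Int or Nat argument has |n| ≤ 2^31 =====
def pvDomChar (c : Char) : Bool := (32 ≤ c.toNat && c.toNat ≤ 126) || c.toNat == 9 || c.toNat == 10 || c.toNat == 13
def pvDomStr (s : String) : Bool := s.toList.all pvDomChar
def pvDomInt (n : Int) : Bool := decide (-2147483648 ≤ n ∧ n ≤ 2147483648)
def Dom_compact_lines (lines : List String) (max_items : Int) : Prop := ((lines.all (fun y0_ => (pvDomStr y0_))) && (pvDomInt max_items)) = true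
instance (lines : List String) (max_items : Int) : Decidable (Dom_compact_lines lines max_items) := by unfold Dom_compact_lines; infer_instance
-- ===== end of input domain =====

-- B fuses A's two passes (normalize into a list, then dedupe with a cap) into one pass over the
-- raw lines with a normalization helper, a seen-set and an early stop at the cap (objective: alternative).


-- ===== PORT A =====
-- A's second loop: dedupe preserving order, break once len(out) >= max_items
def pvDedupeA (items : List String) (seen : PySem.Set String) (out : List String) (max_items : Int) : List String :=
  match items with
  | [] => out
  | item :: rest =>
    if PySem.Set.contains seen item then pvDedupeA rest seen out max_items
    else
      let seen' := PySem.Set.add seen item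
      let out' := out ++ [item]
      if (out'.length : Int) ≥ max_items then out' else pvDedupeA rest seen' out' max_items

def compact_lines (lines : List String) (max_items : Int) : List String :=
  let items : List String := lines.foldl (fun items line =>
    let line := PySem.Str.strip line
    if line = "" then items
    else if PySem.Str.startswith line "- " then items ++ [line]
    else if (PySem.Str.len line : Int) < 160 then items ++ [PySem.Str.join "" ["- ", line]]
    else items) []
  pvDedupeA items PySem.Set.empty [] max_items

-- ===== PORT B =====
-- port of Source B's _norm helper (none = the line is skipped)
def pvNorm (raw : String) : Option String :=
  let line := PySem.Str.strip raw
  if line = "" then none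
  else if PySem.Str.startswith line "- " then some line
  else if (PySem.Str.len line : Int) < 160 then some (PySem.Str.join "" ["- ", line])
  else none

-- Source B's single fused loop
def pvLoopB (lines : List String) (seen : PySem.Set String) (out : List String) (max_items : Int) : List String :=
  match lines with
  | [] => out
  | raw :: rest =>
    match pvNorm raw with
    | none => pvLoopB rest seen out max_items
    | some item =>
      if PySem.Set.contains seen item then pvLoopB rest seen out max_items
      else
        let seen' := PySem.Set.add seen item
        let out' := out ++ [item]
        if (out'.length : Int) ≥ max_items then out' else pvLoopB rest seen' out' max_items

def compact_lines_alt (lines : List String) (max_items : Int) : List String :=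
  pvLoopB lines PySem.Set.empty [] max_items

-- ===== PRECONDITION & SPEC =====
def Spec_compact_lines (lines : List String) (max_items : Int) (out : List String) : Prop := out = compact_lines_alt lines max_items
instance (lines : List String) (max_items : Int) (out : List String) : Decidable (Spec_compact_lines lines max_items out) := by unfold Spec_compact_lines; infer_instance

-- ===== CLAIM (what is proved, stated in full; the proofs are below) =====
def Claim_equal_compact_lines : Prop := ∀ (lines : List String) (max_items : Int), Dom_compact_lines lines max_items → Spec_compact_lines lines max_items (compact_lines lines max_items)

-- ===== LEMMAS AND PROOFS =====

-- A's first loop builds exactly the pvNorm-filterMap of the lines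
theorem pvFoldA_eq (lines : List String) (acc : List String) :
    lines.foldl (fun items line =>
      let line := PySem.Str.strip line
      if line = "" then items
      else if PySem.Str.startswith line "- " then items ++ [line]
      else if (PySem.Str.len line : Int) < 160 then items ++ [PySem.Str.join "" ["- ", line]]
      else items) acc = acc ++ lines.filterMap pvNorm := by
  induction lines generalizing acc with
  | nil => simp
  | cons l rest ih =>
    simp only [List.foldl_cons, List.filterMap_cons]
    rw [ih]
    simp only [pvNorm]
    split_ifs <;> simp_all

-- fusing: A's dedupe loop over the normalized items = B's fused loop over the lines
theorem pvFuse (lines : List String) (seen : PySem.Set String) (out : List String) (m : Int) :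
    pvDedupeA (lines.filterMap pvNorm) seen out m = pvLoopB lines seen out m := by
  induction lines generalizing seen out with
  | nil => simp [pvDedupeA, pvLoopB]
  | cons l rest ih =>
    cases h : pvNorm l with
    | none => simp [h, pvLoopB, ih]
    | some item =>
      simp only [List.filterMap_cons, h, pvLoopB, pvDedupeA]
      split_ifs <;> simp [ih]

-- ===== VERDICT (by name: the statement is the Claim_ definition above) =====
theorem compact_lines_spec : Claim_equal_compact_lines := by
  intro lines max_items _
  unfold Spec_compact_lines compact_lines compact_lines_alt
  rw [pvFoldA_eq, List.nil_append, pvFuse]
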